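-- pv_equiv track=rewrite | github.com/alexandraback/datacollection | solutions_5670465267826688_1/Python/benfei/dijkstra.py | ijk_eq
-- ===== SOURCE A (Python) =====
-- def ijk_eq(ijk_seq):
--     mult_board = {
--         "11": "1", "1i": "i", "1j": "j", "1k": "k",
--         "i1": "i", "ii": "-1", "ij": "k", "ik": "-j",
--         "j1": "j", "ji": "-k", "jj": "-1", "jk": "i",
--         "k1": "k", "ki": "j", "kj": "-i", "kk": "-1",
--     }
--
--     res = "1"
--     for n_i, An in enumerate(ijk_seq):
--         dprev = res.replace("-", "")
--         sprev = res.count("-")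
--         dcurr = An.replace("-", "")
--         scurr = An.count("-")
--         snext = (sprev + scurr) % 2
--         dnext = mult_board[dprev + dcurr]
--         if snext:
--            dnext = "-" + dnext
--         dnext = dnext.replace("--", "")
--         res = dnext
--         if res == "i":
--             break
--     else:
--         return False
--
--     ijk_seq = ijk_seq[n_i+1:]
--     res = "1"
--     for n_j, An in enumerate(ijk_seq):
--         dprev = res.replace("-", "")
--         sprev = res.count("-")
--         dcurr = An.replace("-", "")
--         scurr = An.count("-")
--         snext = (sprev + scurr) % 2
--         dnext = mult_board[dprev + dcurr]
--         if snext: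
--            dnext = "-" + dnext
--         dnext = dnext.replace("--", "")
--         res = dnext
--         if res == "j":
--             break
--     else:
--         return False
--
--     ijk_seq = ijk_seq[n_j+1:]
--     res = "1"
--     for An in ijk_seq:
--         dprev = res.replace("-", "")
--         sprev = res.count("-")
--         dcurr = An.replace("-", "")
--         scurr = An.count("-")
--         snext = (sprev + scurr) % 2
--         dnext = mult_board[dprev + dcurr]
--         if snext:
--            dnext = "-" + dnext
--         dnext = dnext.replace("--", "")
--         res = dnext
--
--     if res == "k":
--         return True
--
--     return False
-- ===== SOURCE B (Python) =====
-- def ijk_eq(ijk_seq):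
--     # single pass: running product kept as (sign parity, unit) pair plus a phase
--     # counter 0/1/2 recording how many of the i, j cut points have been matched.
--     unit_mul = {
--         ("1", "1"): (0, "1"), ("1", "i"): (0, "i"), ("1", "j"): (0, "j"), ("1", "k"): (0, "k"),
--         ("i", "1"): (0, "i"), ("i", "i"): (1, "1"), ("i", "j"): (0, "k"), ("i", "k"): (1, "j"),
--         ("j", "1"): (0, "j"), ("j", "i"): (1, "k"), ("j", "j"): (1, "1"), ("j", "k"): (0, "i"),
--         ("k", "1"): (0, "k"), ("k", "i"): (0, "j"), ("k", "j"): (1, "i"), ("k", "k"): (1, "1"),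
--     }
--     phase = 0
--     sign, unit = 0, "1"
--     for tok in ijk_seq:
--         t_unit = tok.replace("-", "")
--         t_sign = tok.count("-")
--         s, unit = unit_mul[(unit, t_unit)]
--         sign = (sign + t_sign + s) % 2
--         if phase < 2 and sign == 0 and unit == ("i" if phase == 0 else "j"):
--             phase += 1
--             sign, unit = 0, "1"
--     return phase == 2 and sign == 0 and unit == "k"
-- ===== Notes on version B (the rewrite author's own statement) =====
-- stated objective: simpler
-- what changed: A's three copy-pasted loops with break/for-else and two list slicings, working on signed strings with replace/count/'--'-collapse, are replaced by one single pass that keeps the running product as a (sign parity, unit) pair plus a phase counter 0/1/2 advanced at the i and j cut points.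
import Mathlib
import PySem

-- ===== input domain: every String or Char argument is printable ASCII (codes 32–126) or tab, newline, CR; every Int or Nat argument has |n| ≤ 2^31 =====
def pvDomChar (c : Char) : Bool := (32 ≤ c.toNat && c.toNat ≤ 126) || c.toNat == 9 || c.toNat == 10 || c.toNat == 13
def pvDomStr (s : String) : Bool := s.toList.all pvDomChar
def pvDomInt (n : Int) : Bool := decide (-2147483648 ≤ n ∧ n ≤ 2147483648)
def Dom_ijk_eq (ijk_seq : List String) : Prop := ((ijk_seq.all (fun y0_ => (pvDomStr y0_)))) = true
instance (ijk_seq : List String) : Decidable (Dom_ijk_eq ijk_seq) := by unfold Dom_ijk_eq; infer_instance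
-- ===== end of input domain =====

-- B replaces A's three sliced copy-paste loops by one pass over the list keeping a
-- (sign parity, unit) pair and a phase counter; same return value on Pre_ (objective: simpler).


-- ===== PORT A =====
def pvBoard : PySem.Dict String String := PySem.Dict.ofList
  [("11", "1"), ("1i", "i"), ("1j", "j"), ("1k", "k"),
   ("i1", "i"), ("ii", "-1"), ("ij", "k"), ("ik", "-j"),
   ("j1", "j"), ("ji", "-k"), ("jj", "-1"), ("jk", "i"),
   ("k1", "k"), ("ki", "j"), ("kj", "-i"), ("kk", "-1")]

-- the loop body shared by A's three loops (mult_board[...] raises KeyError on a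
-- missing key; Pre_ excludes exactly those inputs, the default "1" is never read there)
def pvStepA (res An : String) : String :=
  let dprev := PySem.Str.replace res "-" ""
  let sprev := PySem.Str.count res "-"
  let dcurr := PySem.Str.replace An "-" ""
  let scurr := PySem.Str.count An "-"
  let snext := (sprev + scurr) % 2
  let dnext := PySem.Dict.getD pvBoard (dprev ++ dcurr) "1"
  let dnext := if snext ≠ 0 then "-" ++ dnext else dnext
  PySem.Str.replace dnext "--" ""

-- third loop: multiply through the rest, then `res == "k"`
def pvLoop3 (res : String) : List String → Bool
  | [] => res == "k"
  | An :: rest => pvLoop3 (pvStepA res An) rest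

-- second loop: break on "j" (continue on the suffix = third loop); for-else → False
def pvLoop2 (res : String) : List String → Bool
  | [] => false
  | An :: rest =>
    let res' := pvStepA res An
    if res' == "j" then pvLoop3 "1" rest else pvLoop2 res' rest

-- first loop: break on "i"; for-else → False
def pvLoop1 (res : String) : List String → Bool
  | [] => false
  | An :: rest =>
    let res' := pvStepA res An
    if res' == "i" then pvLoop2 "1" rest else pvLoop1 res' rest

def ijk_eq (ijk_seq : List String) : Bool := pvLoop1 "1" ijk_seq

-- ===== PORT B =====
def pvUnitMul : PySem.Dict (String × String) (Nat × String) := PySem.Dict.ofList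
  [(("1", "1"), (0, "1")), (("1", "i"), (0, "i")), (("1", "j"), (0, "j")), (("1", "k"), (0, "k")),
   (("i", "1"), (0, "i")), (("i", "i"), (1, "1")), (("i", "j"), (0, "k")), (("i", "k"), (1, "j")),
   (("j", "1"), (0, "j")), (("j", "i"), (1, "k")), (("j", "j"), (1, "1")), (("j", "k"), (0, "i")),
   (("k", "1"), (0, "k")), (("k", "i"), (0, "j")), (("k", "j"), (1, "i")), (("k", "k"), (1, "1"))]

-- B's single loop (unit_mul[...] raises KeyError on a missing key; Pre_ excludes
-- exactly those inputs, the default (0, "1") is never read there)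
def pvLoopB (phase sign : Nat) (unit : String) : List String → Bool
  | [] => phase == 2 && sign == 0 && unit == "k"
  | tok :: rest =>
    let tUnit := PySem.Str.replace tok "-" ""
    let tSign := PySem.Str.count tok "-"
    let su := PySem.Dict.getD pvUnitMul (unit, tUnit) (0, "1")
    let unit' := su.2
    let sign' := (sign + tSign + su.1) % 2
    if phase < 2 && sign' == 0 && unit' == (if phase == 0 then "i" else "j") then
      pvLoopB (phase + 1) 0 "1" rest
    else
      pvLoopB phase sign' unit' rest

def ijk_eq_alt (ijk_seq : List String) : Bool := pvLoopB 0 0 "1" ijk_seq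

-- ===== PRECONDITION & SPEC =====
-- Pre_ excludes exactly the inputs where Python A raises KeyError: a token which,
-- with its '-' signs removed, is not one of "1","i","j","k".
def Pre_ijk_eq (ijk_seq : List String) : Prop :=
  ∀ s ∈ ijk_seq, PySem.Str.replace s "-" "" ∈ (["1", "i", "j", "k"] : List String)
instance (ijk_seq : List String) : Decidable (Pre_ijk_eq ijk_seq) := by unfold Pre_ijk_eq; infer_instance
def pvWitness_ijk_eq : List String := ["i", "-j", "--k", "1"]

def Spec_ijk_eq (ijk_seq : List String) (out : Bool) : Prop := out = ijk_eq_alt ijk_seq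
instance (ijk_seq : List String) (out : Bool) : Decidable (Spec_ijk_eq ijk_seq out) := by unfold Spec_ijk_eq; infer_instance

-- ===== CLAIM (what is proved, stated in full; the proofs are below) =====
def Claim_equal_ijk_eq : Prop := ∀ (ijk_seq : List String), Dom_ijk_eq ijk_seq → Pre_ijk_eq ijk_seq → Spec_ijk_eq ijk_seq (ijk_eq ijk_seq)

-- ===== LEMMAS AND PROOFS =====

-- A's running product, rendered from B's (sign parity, unit) state
def pvCanon (s : Nat) (u : String) : String := if s == 1 then "-" ++ u else u

-- pvStepA reads its token only through (replace tok "-" "", count tok "-")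
def pvStepA' (res d : String) (c : Nat) : String :=
  PySem.Str.replace
    (if (PySem.Str.count res "-" + c) % 2 ≠ 0
     then "-" ++ PySem.Dict.getD pvBoard (PySem.Str.replace res "-" "" ++ d) "1"
     else PySem.Dict.getD pvBoard (PySem.Str.replace res "-" "" ++ d) "1") "--" ""

theorem pvStepA_eq (res An : String) :
    pvStepA res An = pvStepA' res (PySem.Str.replace An "-" "") (PySem.Str.count An "-") := rfl

-- the count enters only through its parity
theorem pvStepA'_mod (res d : String) (c : Nat) :
    pvStepA' res d c = pvStepA' res d (c % 2) := by
  unfold pvStepA'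
  rw [show (PySem.Str.count res "-" + c) % 2 = (PySem.Str.count res "-" + c % 2) % 2 by omega]

-- cons-unfoldings of the four loops, stated let-free
set_option maxHeartbeats 2000000 in
theorem pvLoopB_cons (p s : Nat) (u tok : String) (rest : List String) :
    pvLoopB p s u (tok :: rest) =
      if p < 2 &&
          ((s + PySem.Str.count tok "-" +
              (PySem.Dict.getD pvUnitMul (u, PySem.Str.replace tok "-" "") (0, "1")).1) % 2 == 0) &&
          ((PySem.Dict.getD pvUnitMul (u, PySem.Str.replace tok "-" "") (0, "1")).2 ==
            (if p == 0 then "i" else "j"))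
      then pvLoopB (p + 1) 0 "1" rest
      else pvLoopB p
        ((s + PySem.Str.count tok "-" +
            (PySem.Dict.getD pvUnitMul (u, PySem.Str.replace tok "-" "") (0, "1")).1) % 2)
        (PySem.Dict.getD pvUnitMul (u, PySem.Str.replace tok "-" "") (0, "1")).2 rest := rfl

set_option maxHeartbeats 2000000 in
theorem pvLoop3_cons (res tok : String) (rest : List String) :
    pvLoop3 res (tok :: rest) = pvLoop3 (pvStepA res tok) rest := rfl

set_option maxHeartbeats 2000000 in
theorem pvLoop2_cons (res tok : String) (rest : List String) :
    pvLoop2 res (tok :: rest) =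
      if pvStepA res tok == "j" then pvLoop3 "1" rest else pvLoop2 (pvStepA res tok) rest := rfl

set_option maxHeartbeats 2000000 in
theorem pvLoop1_cons (res tok : String) (rest : List String) :
    pvLoop1 res (tok :: rest) =
      if pvStepA res tok == "i" then pvLoop2 "1" rest else pvLoop1 (pvStepA res tok) rest := rfl

-- the finite step table: A's string step is B's pair step, rendered through pvCanon
theorem pvStep_table : ∀ s ∈ [0, 1], ∀ u ∈ (["1", "i", "j", "k"] : List String),
    ∀ d ∈ (["1", "i", "j", "k"] : List String), ∀ b ∈ [0, 1],
    pvStepA' (pvCanon s u) d b =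
      pvCanon ((s + b + (PySem.Dict.getD pvUnitMul (u, d) (0, "1")).1) % 2)
              (PySem.Dict.getD pvUnitMul (u, d) (0, "1")).2 := by decide

-- B's step state stays in range
theorem pvUnitMul_mem : ∀ u ∈ (["1", "i", "j", "k"] : List String),
    ∀ d ∈ (["1", "i", "j", "k"] : List String),
    (PySem.Dict.getD pvUnitMul (u, d) (0, "1")).1 ∈ [0, 1] ∧
    (PySem.Dict.getD pvUnitMul (u, d) (0, "1")).2 ∈ (["1", "i", "j", "k"] : List String) := by decide

-- A's break tests read off B's state
theorem pvCond_eq : ∀ s ∈ [0, 1], ∀ u ∈ (["1", "i", "j", "k"] : List String),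
    ∀ t ∈ (["i", "j", "k"] : List String),
    (pvCanon s u == t) = (s == 0 && (u == t)) := by decide

theorem pvMem01 (n : Nat) : n % 2 ∈ [0, 1] := by
  rcases Nat.mod_two_eq_zero_or_one n with h | h <;> rw [h] <;> simp

theorem pvLoop3_eq (xs : List String) : ∀ s ∈ [0, 1], ∀ u ∈ (["1", "i", "j", "k"] : List String),
    Pre_ijk_eq xs → pvLoop3 (pvCanon s u) xs = pvLoopB 2 s u xs := by
  induction xs with
  | nil => intro s hs u hu _; fin_cases hs <;> fin_cases hu <;> decide
  | cons An rest ih =>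
    intro s hs u hu hpre
    have hd := hpre An (by simp)
    have hrest : Pre_ijk_eq rest := fun t ht => hpre t (by simp [ht])
    obtain ⟨hsu, huu⟩ := pvUnitMul_mem u hu _ hd
    rw [pvLoop3_cons, pvLoopB_cons, pvStepA_eq, pvStepA'_mod,
      pvStep_table s hs u hu _ hd _ (pvMem01 _),
      show (s + PySem.Str.count An "-" +
          (PySem.Dict.getD pvUnitMul (u, PySem.Str.replace An "-" "") (0, "1")).1) % 2 =
        (s + PySem.Str.count An "-" % 2 +
          (PySem.Dict.getD pvUnitMul (u, PySem.Str.replace An "-" "") (0, "1")).1) % 2 by omega]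
    generalize PySem.Dict.getD pvUnitMul (u, PySem.Str.replace An "-" "") (0, "1") = su at hsu huu ⊢
    have hs2 := pvMem01 (s + PySem.Str.count An "-" % 2 + su.1)
    generalize (s + PySem.Str.count An "-" % 2 + su.1) % 2 = s2 at hs2 ⊢
    have hR : (decide (2 < 2) && (s2 == 0) && (su.2 == if (2 : Nat) == 0 then "i" else "j")) = false := by
      simp
    rw [hR]
    simp only [Bool.false_eq_true, if_false]
    exact ih s2 hs2 su.2 huu hrest

theorem pvLoop2_eq (xs : List String) : ∀ s ∈ [0, 1], ∀ u ∈ (["1", "i", "j", "k"] : List String),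
    Pre_ijk_eq xs → pvLoop2 (pvCanon s u) xs = pvLoopB 1 s u xs := by
  induction xs with
  | nil => intro s hs u hu _; fin_cases hs <;> fin_cases hu <;> decide
  | cons An rest ih =>
    intro s hs u hu hpre
    have hd := hpre An (by simp)
    have hrest : Pre_ijk_eq rest := fun t ht => hpre t (by simp [ht])
    obtain ⟨hsu, huu⟩ := pvUnitMul_mem u hu _ hd
    rw [pvLoop2_cons, pvLoopB_cons, pvStepA_eq, pvStepA'_mod,
      pvStep_table s hs u hu _ hd _ (pvMem01 _),
      show (s + PySem.Str.count An "-" +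
          (PySem.Dict.getD pvUnitMul (u, PySem.Str.replace An "-" "") (0, "1")).1) % 2 =
        (s + PySem.Str.count An "-" % 2 +
          (PySem.Dict.getD pvUnitMul (u, PySem.Str.replace An "-" "") (0, "1")).1) % 2 by omega]
    generalize PySem.Dict.getD pvUnitMul (u, PySem.Str.replace An "-" "") (0, "1") = su at hsu huu ⊢
    have hs2 := pvMem01 (s + PySem.Str.count An "-" % 2 + su.1)
    generalize (s + PySem.Str.count An "-" % 2 + su.1) % 2 = s2 at hs2 ⊢
    rw [pvCond_eq s2 hs2 su.2 huu "j" (by simp)]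
    have hR : (decide (1 < 2) && (s2 == 0) && (su.2 == if (1 : Nat) == 0 then "i" else "j")) =
        (s2 == 0 && (su.2 == "j")) := by simp
    rw [hR]
    by_cases hcc : (s2 == 0 && (su.2 == "j")) = true
    · rw [if_pos hcc, if_pos hcc]
      exact pvLoop3_eq rest 0 (by simp) "1" (by simp) hrest
    · rw [if_neg hcc, if_neg hcc]
      exact ih s2 hs2 su.2 huu hrest

theorem pvLoop1_eq (xs : List String) : ∀ s ∈ [0, 1], ∀ u ∈ (["1", "i", "j", "k"] : List String),
    Pre_ijk_eq xs → pvLoop1 (pvCanon s u) xs = pvLoopB 0 s u xs := by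
  induction xs with
  | nil => intro s hs u hu _; fin_cases hs <;> fin_cases hu <;> decide
  | cons An rest ih =>
    intro s hs u hu hpre
    have hd := hpre An (by simp)
    have hrest : Pre_ijk_eq rest := fun t ht => hpre t (by simp [ht])
    obtain ⟨hsu, huu⟩ := pvUnitMul_mem u hu _ hd
    rw [pvLoop1_cons, pvLoopB_cons, pvStepA_eq, pvStepA'_mod,
      pvStep_table s hs u hu _ hd _ (pvMem01 _),
      show (s + PySem.Str.count An "-" +
          (PySem.Dict.getD pvUnitMul (u, PySem.Str.replace An "-" "") (0, "1")).1) % 2 =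
        (s + PySem.Str.count An "-" % 2 +
          (PySem.Dict.getD pvUnitMul (u, PySem.Str.replace An "-" "") (0, "1")).1) % 2 by omega]
    generalize PySem.Dict.getD pvUnitMul (u, PySem.Str.replace An "-" "") (0, "1") = su at hsu huu ⊢
    have hs2 := pvMem01 (s + PySem.Str.count An "-" % 2 + su.1)
    generalize (s + PySem.Str.count An "-" % 2 + su.1) % 2 = s2 at hs2 ⊢
    rw [pvCond_eq s2 hs2 su.2 huu "i" (by simp)]
    have hR : (decide (0 < 2) && (s2 == 0) && (su.2 == if (0 : Nat) == 0 then "i" else "j")) =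
        (s2 == 0 && (su.2 == "i")) := by simp
    rw [hR]
    by_cases hcc : (s2 == 0 && (su.2 == "i")) = true
    · rw [if_pos hcc, if_pos hcc]
      exact pvLoop2_eq rest 0 (by simp) "1" (by simp) hrest
    · rw [if_neg hcc, if_neg hcc]
      exact ih s2 hs2 su.2 huu hrest

-- ===== VERDICT (by name: the statement is the Claim_ definition above) =====
theorem ijk_eq_spec : Claim_equal_ijk_eq := by
  intro xs _ hpre
  unfold Spec_ijk_eq ijk_eq ijk_eq_alt
  exact pvLoop1_eq xs 0 (by simp) "1" (by simp) hpre
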